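-- pv_equiv track=rewrite | github.com/fridayunuen/DataScience-CONNECT | 100%FotosEnBC/code/aux_mapping_items.py | extract_sku
-- ===== SOURCE A (Python) =====
-- def extract_sku(string, largo=7):
--     # sku is a string of 10 digits togheter in a string
--     sku, sku_10 = "", "0"
--     i_ant = 0
--     for i in range(len(string)):
--         if string[i].isdigit():
--             if i_ant == i-1:
--                 sku += string[i]
--             else:
--                 sku = string[i]
--             i_ant = i
--             if len(sku) == largo:
--                 sku_10 = sku
--     return sku_10
-- ===== SOURCE B (Python) =====
-- def extract_sku(string, largo=7):
--     # split the string into maximal digit runs, then keep the largo-prefix of the last long-enough run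
--     runs = "".join(c if c.isdigit() else " " for c in string).split()
--     result = "0"
--     for run in runs:
--         if 1 <= largo <= len(run):
--             result = run[:largo]
--     return result
-- ===== Notes on version B (the rewrite author's own statement) =====
-- stated objective: simpler
-- what changed: Replaced A's index/i_ant state machine with incremental mid-run length checks by masking non-digits to spaces, splitting into maximal digit runs, and taking the largo-prefix of the last run of length >= largo.
import Mathlib
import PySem

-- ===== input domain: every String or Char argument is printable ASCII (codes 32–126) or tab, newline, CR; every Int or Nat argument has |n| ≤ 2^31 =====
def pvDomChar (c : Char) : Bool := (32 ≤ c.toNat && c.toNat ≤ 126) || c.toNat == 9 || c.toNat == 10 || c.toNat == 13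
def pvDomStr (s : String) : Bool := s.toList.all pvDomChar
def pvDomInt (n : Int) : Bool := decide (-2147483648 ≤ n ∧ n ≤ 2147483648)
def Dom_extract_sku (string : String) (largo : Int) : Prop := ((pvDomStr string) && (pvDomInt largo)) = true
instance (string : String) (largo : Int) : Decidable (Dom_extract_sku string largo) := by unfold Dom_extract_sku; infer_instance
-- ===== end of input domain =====

-- B replaces A's index/i_ant state machine by mask-split into maximal digit runs plus one filtered pass (simpler decomposition, same O(n) cost).

-- ===== PORT A =====
-- state: (sku, sku_10, i_ant); for i in range(len(string))
def extract_sku (string : String) (largo : Int) : String :=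
  let cs := string.toList
  let st := (List.range cs.length).foldl
    (fun (st : List Char × List Char × Int) (i : Nat) =>
      let c := PySem.List.pyGetD cs (i : Int) ' '
      if PySem.Chars.isdigit c then
        let sku := if st.2.2 = (i : Int) - 1 then st.1 ++ [c] else [c]
        let sku10 := if (sku.length : Int) = largo then sku else st.2.1
        (sku, sku10, (i : Int))
      else st)
    ([], ['0'], 0)
  String.ofList st.2.1

-- ===== PORT B =====
def extract_sku_alt (string : String) (largo : Int) : String :=
  let masked := string.toList.map (fun c => if PySem.Chars.isdigit c then c else ' ')
  let runs := PySem.Chars.split₀ masked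
  let res := runs.foldl
    (fun best run =>
      if 1 ≤ largo ∧ largo ≤ (run.length : Int) then PySem.List.slice run none (some largo) else best)
    ['0']
  String.ofList res

-- ===== PRECONDITION & SPEC =====
def Spec_extract_sku (string : String) (largo : Int) (out : String) : Prop := out = extract_sku_alt string largo
instance (string : String) (largo : Int) (out : String) : Decidable (Spec_extract_sku string largo out) := by unfold Spec_extract_sku; infer_instance

-- ===== CLAIM (what is proved, stated in full; the proofs are below) =====
def Claim_equal_extract_sku : Prop := ∀ (string : String) (largo : Int), Dom_extract_sku string largo → Spec_extract_sku string largo (extract_sku string largo)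

-- ===== LEMMAS AND PROOFS =====

-- proof-side name for A's loop body (identical to the lambda in extract_sku)
def pvStepA (cs : List Char) (largo : Int) (st : List Char × List Char × Int) (i : Nat) :
    List Char × List Char × Int :=
  let c := PySem.List.pyGetD cs (i : Int) ' '
  if PySem.Chars.isdigit c then
    let sku := if st.2.2 = (i : Int) - 1 then st.1 ++ [c] else [c]
    let sku10 := if (sku.length : Int) = largo then sku else st.2.1
    (sku, sku10, (i : Int))
  else st

theorem pv_A_unfold (string : String) (largo : Int) :
    extract_sku string largo =
      String.ofList (((List.range string.toList.length).foldl (pvStepA string.toList largo)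
        ([], ['0'], 0)).2.1) := rfl

-- proof-side eager scan: state (current run, best)
def pvStepE (largo : Int) (st : List Char × List Char) (c : Char) : List Char × List Char :=
  if PySem.Chars.isdigit c then
    let cur := st.1 ++ [c]
    (cur, if (cur.length : Int) = largo then cur else st.2)
  else ([], st.2)

def pvStepB (largo : Int) (best run : List Char) : List Char :=
  if 1 ≤ largo ∧ largo ≤ (run.length : Int) then PySem.List.slice run none (some largo) else best

def pvMask (c : Char) : Char := if PySem.Chars.isdigit c then c else ' '

theorem pv_slice_take (largo : Int) (h : 1 ≤ largo) (run : List Char) :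
    PySem.List.slice run none (some largo) = run.take largo.toNat := by
  simp only [PySem.List.slice, PySem.List.clampIdx]
  rw [if_neg (by omega)]
  simp [← List.take_eq_take_min]

-- split₀.go accumulator lemma
theorem pv_go_acc (s : List Char) : ∀ cur acc,
    PySem.Chars.split₀.go s cur acc = acc.reverse ++ PySem.Chars.split₀.go s cur [] := by
  induction s with
  | nil => intro cur acc; simp [PySem.Chars.split₀.go]; split <;> simp
  | cons c t ih =>
      intro cur acc
      simp only [PySem.Chars.split₀.go]
      split
      · split
        · exact ih [] acc
        · rw [ih [] (cur.reverse :: acc), ih [] [cur.reverse]]; simp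
      · exact ih (c :: cur) acc

-- a nonempty pending run is a prefix of the first run split₀.go yields
theorem pv_first_run (s : List Char) : ∀ cur : List Char, cur ≠ [] →
    ∃ r rest, PySem.Chars.split₀.go s cur.reverse [] = (cur ++ r) :: rest := by
  induction s with
  | nil =>
      intro cur hc
      refine ⟨[], [], ?_⟩
      simp [PySem.Chars.split₀.go, hc]
  | cons c t ih =>
      intro cur hc
      simp only [PySem.Chars.split₀.go]
      by_cases hs : PySem.Chars.isspace c = true
      · rw [if_pos hs, if_neg (by simp [hc]), pv_go_acc]
        exact ⟨[], PySem.Chars.split₀.go t [] [], by simp⟩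
      · rw [if_neg hs]
        obtain ⟨r, rest, hr⟩ := ih (cur ++ [c]) (by simp)
        rw [List.reverse_append] at hr
        exact ⟨[c] ++ r, rest, by simpa using hr⟩

-- a pending run that already qualifies makes the fold independent of the carried best
theorem pv_absorb (largo : Int) (s cur : List Char) (h1 : 1 ≤ largo)
    (h2 : largo ≤ (cur.length : Int)) (b1 b2 : List Char) :
    (PySem.Chars.split₀.go s cur.reverse []).foldl (pvStepB largo) b1 =
      (PySem.Chars.split₀.go s cur.reverse []).foldl (pvStepB largo) b2 := by
  have hc : cur ≠ [] := by intro h; subst h; simp at h2; omega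
  obtain ⟨r, rest, hr⟩ := pv_first_run s cur hc
  rw [hr]
  simp only [List.foldl_cons]
  have hcond : pvStepB largo b1 (cur ++ r) = pvStepB largo b2 (cur ++ r) := by
    unfold pvStepB
    rw [if_pos ⟨h1, by simp; omega⟩, if_pos ⟨h1, by simp; omega⟩]
  rw [hcond]

-- isspace facts for the masked alphabet
theorem pv_isspace_space : PySem.Chars.isspace ' ' = true := by decide
theorem pv_digit_not_space (c : Char) (h : PySem.Chars.isdigit c = true) :
    PySem.Chars.isspace c = false := by
  unfold PySem.Chars.isdigit at h
  simp only [Bool.and_eq_true, decide_eq_true_eq, Char.le_def, UInt32.le_iff_toNat_le] at h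
  obtain ⟨h1, h2⟩ := h
  have e0 : (('0':Char).val.toNat) = 48 := by decide
  have e9 : (('9':Char).val.toNat) = 57 := by decide
  rw [e0] at h1; rw [e9] at h2
  unfold PySem.Chars.isspace
  simp only [Char.toNat] at *
  simp only [Bool.or_eq_false_iff, Bool.and_eq_false_iff, decide_eq_false_iff_not]
  omega

-- A's fold equals the eager scan (loop invariant on the i_ant bookkeeping)
theorem pv_A_eq_E (cs : List Char) (largo : Int) : ∀ n, n ≤ cs.length →
    (((List.range n).foldl (pvStepA cs largo) ([], ['0'], 0)).2.1 =
        ((cs.take n).foldl (pvStepE largo) ([], ['0'])).2) ∧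
    ((((List.range n).foldl (pvStepA cs largo) ([], ['0'], 0)).2.2 = (n : Int) - 1 ∧
        ((List.range n).foldl (pvStepA cs largo) ([], ['0'], 0)).1 =
          ((cs.take n).foldl (pvStepE largo) ([], ['0'])).1) ∨
      (((List.range n).foldl (pvStepA cs largo) ([], ['0'], 0)).2.2 ≠ (n : Int) - 1 ∧
        ((cs.take n).foldl (pvStepE largo) ([], ['0'])).1 = [] ∧
        ((List.range n).foldl (pvStepA cs largo) ([], ['0'], 0)).2.2 ≤ (n : Int) - 1) ∨
      (n = 0 ∧ ((List.range n).foldl (pvStepA cs largo) ([], ['0'], 0)).2.2 = 0 ∧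
        ((List.range n).foldl (pvStepA cs largo) ([], ['0'], 0)).1 = [] ∧
        ((cs.take n).foldl (pvStepE largo) ([], ['0'])).1 = [])) := by
  intro n
  induction n with
  | zero => intro _; simp
  | succ n ih =>
      intro hn
      have hn' : n ≤ cs.length := Nat.le_of_succ_le hn
      have hlt : n < cs.length := hn
      obtain ⟨ih1, ih2⟩ := ih hn'
      set a := (List.range n).foldl (pvStepA cs largo) ([], ['0'], 0) with ha
      set e := (cs.take n).foldl (pvStepE largo) ([], ['0']) with he
      have hr : List.range (n + 1) = List.range n ++ [n] := List.range_succ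
      have ht : cs.take (n + 1) = cs.take n ++ [cs[n]] := by
        rw [List.take_add_one]; simp [List.getElem?_eq_getElem hlt]
      rw [hr, List.foldl_append, ht, List.foldl_append, ← ha, ← he]
      simp only [List.foldl_cons, List.foldl_nil]
      have hget : PySem.List.pyGetD cs (n : Int) ' ' = cs[n] := by
        simp [PySem.List.pyGetD_natCast, List.getD, List.getElem?_eq_getElem hlt]
      by_cases hd : PySem.Chars.isdigit cs[n] = true
      · -- digit step
        have hsku : (pvStepA cs largo a n).1 =
            (if a.2.2 = (n : Int) - 1 then a.1 ++ [cs[n]] else [cs[n]]) := by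
          simp [pvStepA, hget, hd]
        have hcur : (pvStepE largo e cs[n]).1 = e.1 ++ [cs[n]] := by
          simp [pvStepE, hd]
        have hrun : (pvStepA cs largo a n).1 = (pvStepE largo e cs[n]).1 := by
          rw [hsku, hcur]
          rcases ih2 with ⟨h1, h2⟩ | ⟨h1, h2, h3⟩ | ⟨h0, h1, h2, h3⟩
          · rw [if_pos h1, h2]
          · rw [if_neg h1, h2]; simp
          · subst h0
            rw [if_neg (by rw [h1]; norm_num), h3]; simp
        refine ⟨?_, Or.inl ⟨by simp [pvStepA, hget, hd], hrun⟩⟩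
        have hb1 : (pvStepA cs largo a n).2.1 =
            (if (((pvStepA cs largo a n).1).length : Int) = largo
             then (pvStepA cs largo a n).1 else a.2.1) := by
          simp [pvStepA, hget, hd]
        have hb2 : (pvStepE largo e cs[n]).2 =
            (if (((pvStepE largo e cs[n]).1).length : Int) = largo
             then (pvStepE largo e cs[n]).1 else e.2) := by
          simp [pvStepE, hd]
        rw [hb1, hb2, hrun, ih1]
      · -- non-digit step: A's state unchanged, E resets cur
        have hA : pvStepA cs largo a n = a := by simp [pvStepA, hget, hd]
        have hE1 : (pvStepE largo e cs[n]).1 = [] := by simp [pvStepE, hd]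
        have hE2 : (pvStepE largo e cs[n]).2 = e.2 := by simp [pvStepE, hd]
        refine ⟨by rw [hA, hE2, ih1], ?_⟩
        rcases ih2 with ⟨h1, h2⟩ | ⟨h1, h2, h3⟩ | ⟨h0, h1, h2, h3⟩
        · exact Or.inr (Or.inl ⟨by rw [hA]; push_cast; omega, hE1,
            by rw [hA]; push_cast; omega⟩)
        · exact Or.inr (Or.inl ⟨by rw [hA]; push_cast; omega, hE1,
            by rw [hA]; push_cast; omega⟩)
        · -- n = 0 and the scan saw no digit yet: i_ant = 0 = (n+1) - 1 and sku = [] = cur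
          subst h0
          exact Or.inl ⟨by rw [hA, h1]; norm_num, by rw [hA, h2, hE1]⟩

-- eager scan equals B's run fold
theorem pv_E_eq_B (largo : Int) (cs : List Char) : ∀ cur best,
    (1 ≤ largo → largo ≤ (cur.length : Int) → best = cur.take largo.toNat) →
    (cs.foldl (pvStepE largo) (cur, best)).2 =
      (PySem.Chars.split₀.go (cs.map pvMask) cur.reverse []).foldl (pvStepB largo) best := by
  induction cs with
  | nil =>
      intro cur best hinv
      simp only [List.foldl_nil, List.map_nil, PySem.Chars.split₀.go]
      by_cases hc : cur = []
      · subst hc; simp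
      · rw [if_neg (by simp [hc])]
        simp only [List.reverse_reverse, List.reverse_cons, List.reverse_nil,
          List.nil_append, List.foldl_cons, List.foldl_nil]
        unfold pvStepB
        split
        · rename_i h
          rw [hinv h.1 h.2, pv_slice_take largo h.1]
        · rfl
  | cons c t ih =>
      intro cur best hinv
      simp only [List.foldl_cons, List.map_cons]
      by_cases hd : PySem.Chars.isdigit c = true
      · -- digit: extends the run
        have hm : pvMask c = c := by simp [pvMask, hd]
        rw [hm]
        have hstep : pvStepE largo (cur, best) c =
            (cur ++ [c], if ((cur ++ [c]).length : Int) = largo then cur ++ [c] else best) := by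
          simp [pvStepE, hd]
        rw [hstep]
        have hgo : PySem.Chars.split₀.go (c :: t.map pvMask) cur.reverse [] =
            PySem.Chars.split₀.go (t.map pvMask) (cur ++ [c]).reverse [] := by
          simp [PySem.Chars.split₀.go, pv_digit_not_space c hd]
        rw [hgo]
        by_cases heq : ((cur ++ [c]).length : Int) = largo
        · rw [if_pos heq]
          have h1 : 1 ≤ largo := by simp at heq; omega
          rw [ih (cur ++ [c]) (cur ++ [c])
            (by intro _ _
                have : largo.toNat = (cur ++ [c]).length := by simp at heq ⊢; omega
                rw [this, List.take_length])]
          exact pv_absorb largo (t.map pvMask) (cur ++ [c]) h1 (le_of_eq heq.symm) _ _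
        · rw [if_neg heq]
          apply ih
          intro h1 h2
          have hle : largo ≤ (cur.length : Int) := by simp at h2 heq ⊢; omega
          rw [hinv h1 hle, List.take_append_of_le_length (by omega)]
      · -- non-digit: flush the run
        have hm : pvMask c = ' ' := by simp [pvMask, hd]
        rw [hm]
        have hstep : pvStepE largo (cur, best) c = ([], best) := by simp [pvStepE, hd]
        rw [hstep]
        by_cases hc : cur = []
        · subst hc
          have hgo : PySem.Chars.split₀.go (' ' :: t.map pvMask) ([] : List Char).reverse [] =
              PySem.Chars.split₀.go (t.map pvMask) ([] : List Char).reverse [] := by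
            simp [PySem.Chars.split₀.go, pv_isspace_space]
          rw [hgo]
          exact ih [] best (by intro h1 h2; simp at h2; omega)
        · have hgo : PySem.Chars.split₀.go (' ' :: t.map pvMask) cur.reverse [] =
              cur :: PySem.Chars.split₀.go (t.map pvMask) ([] : List Char).reverse [] := by
            simp only [PySem.Chars.split₀.go, pv_isspace_space, if_pos]
            rw [if_neg (by simp [hc]), pv_go_acc]
            simp
          rw [hgo]
          simp only [List.foldl_cons]
          have hbb : pvStepB largo best cur = best := by
            unfold pvStepB
            split
            · rename_i h
              rw [hinv h.1 h.2, pv_slice_take largo h.1]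
            · rfl
          rw [hbb]
          exact ih [] best (by intro h1 h2; simp at h2; omega)

-- ===== VERDICT (by name: the statement is the Claim_ definition above) =====
theorem extract_sku_spec : Claim_equal_extract_sku := by
  intro string largo _
  unfold Spec_extract_sku extract_sku_alt
  rw [pv_A_unfold]
  have hA := (pv_A_eq_E string.toList largo string.toList.length le_rfl).1
  simp only [List.take_length] at hA
  have hB := pv_E_eq_B largo string.toList [] ['0'] (by intro h1 h2; simp at h2; omega)
  simp only [List.reverse_nil] at hB
  rw [hA, hB]
  rfl
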